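-- pv_equiv track=rewrite | github.com/dfwlab/cyclicpeptide | cyclicpeptide/Structure2Sequence.py | search_one_chain
-- ===== SOURCE A (Python) =====
-- def search_one_chain(query_idx, search_idxs, N, connected_pairs):
--     r = 0
--     chain = [query_idx]
--     while r < N:
--         for i, j, t in connected_pairs:
--             if i == query_idx and j in search_idxs and t != 'side chain':
--                 query_idx = j
--                 chain.append(query_idx)
--                 search_idxs = [k for k in search_idxs if k not in chain]
--                 break
--             elif j == query_idx and i in search_idxs and t != 'side chain':
--                 query_idx = i
--                 chain.append(query_idx)
--                 search_idxs = [k for k in search_idxs if k not in chain]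
--                 break
--         r += 1
--     return chain
-- ===== SOURCE B (Python) =====
-- def search_one_chain(query_idx, search_idxs, N, connected_pairs):
--     # Build neighbor adjacency once (pair order preserved), keep availability in a set,
--     # follow the chain with early exit when no neighbor is available.
--     adj = {}
--     for i, j, t in connected_pairs:
--         if t != 'side chain':
--             adj.setdefault(i, []).append(j)
--             adj.setdefault(j, []).append(i)
--     available = set(search_idxs)
--     chain = [query_idx]
--     cur = query_idx
--     steps = 0
--     while steps < N:
--         nxt = next((v for v in adj.get(cur, ()) if v in available), None)
--         if nxt is None:
--             break
--         chain.append(nxt)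
--         available.discard(cur)
--         available.discard(nxt)
--         cur = nxt
--         steps += 1
--     return chain
-- ===== Notes on version B (the rewrite author's own statement) =====
-- stated objective: faster
-- what changed: Replaces the N-round rescan of all pairs with a one-time per-node adjacency index plus a set of available nodes, following the chain with early exit instead of re-filtering the search list every round.
import Mathlib
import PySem

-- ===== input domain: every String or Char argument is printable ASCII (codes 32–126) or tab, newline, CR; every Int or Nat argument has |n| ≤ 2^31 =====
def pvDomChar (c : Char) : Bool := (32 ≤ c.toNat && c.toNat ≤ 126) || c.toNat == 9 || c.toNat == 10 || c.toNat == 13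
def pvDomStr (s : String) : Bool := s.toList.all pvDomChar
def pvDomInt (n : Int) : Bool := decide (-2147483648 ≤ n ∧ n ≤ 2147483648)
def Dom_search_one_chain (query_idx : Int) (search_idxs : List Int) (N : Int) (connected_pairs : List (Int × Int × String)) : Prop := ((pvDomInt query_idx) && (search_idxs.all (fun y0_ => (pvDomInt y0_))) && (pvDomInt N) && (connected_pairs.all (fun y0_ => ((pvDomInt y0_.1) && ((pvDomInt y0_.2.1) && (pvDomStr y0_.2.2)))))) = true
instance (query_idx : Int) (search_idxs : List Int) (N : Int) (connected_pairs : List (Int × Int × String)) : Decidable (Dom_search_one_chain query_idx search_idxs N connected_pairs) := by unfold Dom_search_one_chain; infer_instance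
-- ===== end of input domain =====

-- B builds a per-node adjacency index once and follows the chain with a set of available
-- nodes and early exit, instead of A's N full rescans of the pair list (faster in a timing run).

-- ===== PORT A =====
-- inner 'for i, j, t in connected_pairs: ... break': first matching pair, as a scan
def findPair (q : Int) (sidxs : List Int) : List (Int × Int × String) → Option Int
  | [] => none
  | (i, j, t) :: rest =>
    if i = q ∧ j ∈ sidxs ∧ t ≠ "side chain" then some j
    else if j = q ∧ i ∈ sidxs ∧ t ≠ "side chain" then some i
    else findPair q sidxs rest

-- the 'while r < N' loop: runs exactly max(N,0) rounds, state (query_idx, search_idxs, chain)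
def aLoop (cps : List (Int × Int × String)) : Nat → Int → List Int → List Int → List Int
  | 0, _, _, chain => chain
  | fuel + 1, q, sidxs, chain =>
    match findPair q sidxs cps with
    | none => aLoop cps fuel q sidxs chain
    | some j =>
      let chain' := chain ++ [j]
      aLoop cps fuel j (sidxs.filter (fun k => !(chain'.contains k))) chain'

def search_one_chain (query_idx : Int) (search_idxs : List Int) (N : Int) (connected_pairs : List (Int × Int × String)) : List Int :=
  aLoop connected_pairs N.toNat query_idx search_idxs [query_idx]

-- ===== PORT B =====
-- 'adj.setdefault(i, []).append(j); adj.setdefault(j, []).append(i)' for non-side-chain pairs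
def buildAdj (cps : List (Int × Int × String)) : PySem.Dict Int (List Int) :=
  cps.foldl (fun d p =>
    if p.2.2 ≠ "side chain" then
      (d.modify p.1 [] (fun l => l ++ [p.2.1])).modify p.2.1 [] (fun l => l ++ [p.1])
    else d) PySem.Dict.empty

-- the 'while steps < N' loop with 'break': state (cur, available, chain)
def bLoop (adj : PySem.Dict Int (List Int)) : Nat → Int → PySem.Set Int → List Int → List Int
  | 0, _, _, chain => chain
  | fuel + 1, cur, avail, chain =>
    match (adj.getD cur []).find? (fun v => PySem.Set.contains avail v) with
    | none => chain
    | some v => bLoop adj fuel v (PySem.Set.discard (PySem.Set.discard avail cur) v) (chain ++ [v])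

def search_one_chain_alt (query_idx : Int) (search_idxs : List Int) (N : Int) (connected_pairs : List (Int × Int × String)) : List Int :=
  bLoop (buildAdj connected_pairs) N.toNat query_idx (PySem.Set.ofList search_idxs) [query_idx]

-- ===== PRECONDITION & SPEC =====
def Spec_search_one_chain (query_idx : Int) (search_idxs : List Int) (N : Int) (connected_pairs : List (Int × Int × String)) (out : List Int) : Prop := out = search_one_chain_alt query_idx search_idxs N connected_pairs
instance (query_idx : Int) (search_idxs : List Int) (N : Int) (connected_pairs : List (Int × Int × String)) (out : List Int) : Decidable (Spec_search_one_chain query_idx search_idxs N connected_pairs out) := by unfold Spec_search_one_chain; infer_instance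

-- ===== CLAIM (what is proved, stated in full; the proofs are below) =====
def Claim_equal_search_one_chain : Prop := ∀ (query_idx : Int) (search_idxs : List Int) (N : Int) (connected_pairs : List (Int × Int × String)), Dom_search_one_chain query_idx search_idxs N connected_pairs → Spec_search_one_chain query_idx search_idxs N connected_pairs (search_one_chain query_idx search_idxs N connected_pairs)

-- ===== LEMMAS AND PROOFS =====

-- the neighbors of q contributed by the pair list, in scan order
def nbrs (q : Int) (cps : List (Int × Int × String)) : List Int :=
  cps.flatMap (fun p =>
    if p.2.2 ≠ "side chain" then
      (if p.1 = q then [p.2.1] else []) ++ (if p.2.1 = q then [p.1] else [])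
    else [])

lemma buildAdj_getD_aux (q : Int) (cps : List (Int × Int × String)) :
    ∀ d : PySem.Dict Int (List Int),
      (cps.foldl (fun d p =>
        if p.2.2 ≠ "side chain" then
          (d.modify p.1 [] (fun l => l ++ [p.2.1])).modify p.2.1 [] (fun l => l ++ [p.1])
        else d) d).getD q [] = d.getD q [] ++ nbrs q cps := by
  induction cps with
  | nil => intro d; simp [nbrs]
  | cons p rest ih =>
    intro d
    obtain ⟨i, j, t⟩ := p
    by_cases ht : t ≠ "side chain"
    · simp only [List.foldl_cons, if_pos ht]
      rw [ih]
      simp only [PySem.Dict.getD_modify]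
      by_cases hi : q = i <;> by_cases hj : q = j
      · simp [← hi, ← hj, nbrs, ht, List.append_assoc]
      · simp [← hi, hj, Ne.symm hj, nbrs, ht, List.append_assoc]
      · simp [hi, Ne.symm hi, ← hj, nbrs, ht, List.append_assoc]
      · simp [hi, Ne.symm hi, hj, Ne.symm hj, nbrs, ht]
    · simp only [List.foldl_cons, if_neg ht]
      rw [ih]
      simp [nbrs, ht]

lemma buildAdj_getD (q : Int) (cps : List (Int × Int × String)) :
    (buildAdj cps).getD q [] = nbrs q cps := by
  unfold buildAdj
  rw [buildAdj_getD_aux]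
  simp

lemma findPair_eq_find? (q : Int) (sidxs : List Int) (cps : List (Int × Int × String)) :
    findPair q sidxs cps = (nbrs q cps).find? (fun v => sidxs.contains v) := by
  induction cps with
  | nil => simp [findPair, nbrs]
  | cons p rest ih =>
    obtain ⟨i, j, t⟩ := p
    simp only [nbrs, List.flatMap_cons] at *
    rw [findPair, List.find?_append]
    by_cases ht : t ≠ "side chain"
    · by_cases hi : i = q <;> by_cases hj : j = q <;>
        by_cases hjs : j ∈ sidxs <;> by_cases his : i ∈ sidxs <;>
        simp_all [List.find?]
    · simp_all

lemma aLoop_none (cps : List (Int × Int × String)) (fuel : Nat) (q : Int)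
    (sidxs chain : List Int) (h : findPair q sidxs cps = none) :
    aLoop cps fuel q sidxs chain = chain := by
  induction fuel with
  | zero => rfl
  | succ n ih => rw [aLoop, h]; exact ih

lemma loop_eq (cps : List (Int × Int × String)) (fuel : Nat) :
    ∀ (q : Int) (sidxs : List Int) (avail : PySem.Set Int) (chain : List Int),
      (∀ v : Int, v ∈ sidxs ↔ v ∈ avail) →
      (∀ v ∈ chain, v = q ∨ v ∉ sidxs) →
      q ∈ chain →
      aLoop cps fuel q sidxs chain = bLoop (buildAdj cps) fuel q avail chain := by
  induction fuel with
  | zero => intros; rfl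
  | succ n ih =>
    intro q sidxs avail chain h1 h2 h3
    rw [aLoop, bLoop, buildAdj_getD]
    have hpred : (fun v => sidxs.contains v) = (fun v => PySem.Set.contains avail v) := by
      funext v
      by_cases hv : v ∈ sidxs
      · have ha : v ∈ avail := (h1 v).1 hv
        simp [List.contains_eq_mem, hv]
        exact ha
      · have ha : v ∉ avail := fun h => hv ((h1 v).2 h)
        simp [List.contains_eq_mem, hv]
        exact ha
    rw [findPair_eq_find?, hpred]
    cases hf : ((nbrs q cps).find? (fun v => PySem.Set.contains avail v)) with
    | none =>
      have hnone : findPair q sidxs cps = none := by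
        rw [findPair_eq_find?, hpred, hf]
      exact aLoop_none cps n q sidxs chain hnone
    | some j =>
      apply ih
      · intro v
        constructor
        · intro hv
          rw [List.mem_filter] at hv
          obtain ⟨hvs, hvc⟩ := hv
          simp only [Bool.not_eq_true', List.contains_eq_mem, decide_eq_false_iff_not,
            List.mem_append, List.mem_singleton, not_or] at hvc
          obtain ⟨hvchain, hvj⟩ := hvc
          have hvq : v ≠ q := fun e => hvchain (e ▸ h3)
          rw [PySem.Set.mem_discard, PySem.Set.mem_discard]
          exact ⟨⟨(h1 v).1 hvs, hvq⟩, hvj⟩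
        · intro hv
          rw [PySem.Set.mem_discard, PySem.Set.mem_discard] at hv
          obtain ⟨⟨hva, hvq⟩, hvj⟩ := hv
          have hvs : v ∈ sidxs := (h1 v).2 hva
          rw [List.mem_filter]
          refine ⟨hvs, ?_⟩
          simp only [Bool.not_eq_true', List.contains_eq_mem, decide_eq_false_iff_not,
            List.mem_append, List.mem_singleton, not_or]
          refine ⟨fun hvchain => ?_, hvj⟩
          rcases h2 v hvchain with e | hns
          · exact hvq e
          · exact hns hvs
      · intro v hv
        by_cases e : v = j
        · exact Or.inl e
        · right
          intro hvs
          rw [List.mem_filter] at hvs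
          have := hvs.2
          simp only [Bool.not_eq_true', List.contains_eq_mem, decide_eq_false_iff_not] at this
          exact this hv
      · simp

-- ===== VERDICT (by name: the statement is the Claim_ definition above) =====
theorem search_one_chain_spec : Claim_equal_search_one_chain := by
  intro q s N cps _
  unfold Spec_search_one_chain search_one_chain search_one_chain_alt
  apply loop_eq
  · intro v; simp [PySem.Set.mem_ofList]
  · intro v hv; left; simpa using hv
  · simp
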